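-- pv_equiv track=rewrite | github.com/joyboyAT/Ayusynapse-2.0 | trial_matching.py | _conditions_match_umls
-- ===== SOURCE A (Python) =====
-- def _conditions_match_umls(patient_condition, trial_condition, patient_cuis):
--     """Enhanced condition matching using UMLS concepts"""
--     # Direct string match
--     if patient_condition.lower() in trial_condition.lower():
--         return True
--
--     # UMLS concept matching (simplified)
--     condition_mappings = {
--         'diabetes': ['diabetes', 'diabetic', 'hyperglycemia', 'glucose'],
--         'type 2 diabetes': ['type 2', 'diabetes mellitus', 'non-insulin dependent'],
--         'hypertension': ['hypertension', 'high blood pressure', 'elevated bp', 'htn'],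
--         'heart disease': ['cardiac', 'cardiovascular', 'heart', 'coronary'],
--         'depression': ['depression', 'depressive', 'mood disorder', 'mental health']
--     }
--
--     patient_lower = patient_condition.lower()
--     trial_lower = trial_condition.lower()
--
--     for base_condition, variations in condition_mappings.items():
--         if patient_lower in variations or patient_lower == base_condition:
--             if any(var in trial_lower for var in variations):
--                 return True
--
--     return False
-- ===== SOURCE B (Python) =====
-- _CONDITION_MAPPINGS = {
--     'diabetes': ['diabetes', 'diabetic', 'hyperglycemia', 'glucose'],
--     'type 2 diabetes': ['type 2', 'diabetes mellitus', 'non-insulin dependent'],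
--     'hypertension': ['hypertension', 'high blood pressure', 'elevated bp', 'htn'],
--     'heart disease': ['cardiac', 'cardiovascular', 'heart', 'coronary'],
--     'depression': ['depression', 'depressive', 'mood disorder', 'mental health'],
-- }
--
-- # Inverted index: every lookup key (base condition or any of its variations)
-- # maps to the full variation list of its group.  Built once at import time;
-- # no key belongs to two groups, so lookup order is irrelevant.
-- _INDEX = {}
-- for _base, _vars in _CONDITION_MAPPINGS.items():
--     for _key in (_base, *_vars):
--         _INDEX[_key] = _vars
--
--
-- def _conditions_match_umls(patient_condition, trial_condition, patient_cuis):
--     """Enhanced condition matching using UMLS concepts"""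
--     patient_lower = patient_condition.lower()
--     trial_lower = trial_condition.lower()
--     if patient_lower in trial_lower:
--         return True
--     variations = _INDEX.get(patient_lower)
--     if variations is None:
--         return False
--     return any(var in trial_lower for var in variations)
-- ===== Notes on version B (the rewrite author's own statement) =====
-- stated objective: simpler
-- what changed: Replaced A's per-call scan over all five condition groups (list membership test per group, then a containment pass) by an inverted index built once at import time that maps every lookup key (base condition or variation) to its group's variation list, so a call is one dict lookup plus one containment pass; equivalent because no key belongs to two groups.
import Mathlib
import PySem

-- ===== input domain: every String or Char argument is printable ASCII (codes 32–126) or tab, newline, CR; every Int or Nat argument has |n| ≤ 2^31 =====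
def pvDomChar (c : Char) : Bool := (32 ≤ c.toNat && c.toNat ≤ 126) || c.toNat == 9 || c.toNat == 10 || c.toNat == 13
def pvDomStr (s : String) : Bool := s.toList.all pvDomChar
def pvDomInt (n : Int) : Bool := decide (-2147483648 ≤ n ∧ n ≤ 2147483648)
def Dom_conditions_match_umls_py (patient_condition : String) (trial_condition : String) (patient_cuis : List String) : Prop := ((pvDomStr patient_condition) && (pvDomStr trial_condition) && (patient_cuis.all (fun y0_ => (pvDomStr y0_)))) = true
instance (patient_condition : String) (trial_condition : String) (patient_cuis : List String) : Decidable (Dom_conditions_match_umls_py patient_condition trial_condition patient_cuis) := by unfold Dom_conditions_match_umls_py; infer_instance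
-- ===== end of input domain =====

-- B rewrites A's loop over all condition groups as a single lookup in an
-- inverted index built once (objective: simpler/alternative; correct because no
-- lookup key belongs to two groups).

-- ===== PORT A =====
-- the literal condition_mappings dict of A (and of B's group table)
def pvCondMappings : List (String × List String) :=
  [("diabetes", ["diabetes", "diabetic", "hyperglycemia", "glucose"]),
   ("type 2 diabetes", ["type 2", "diabetes mellitus", "non-insulin dependent"]),
   ("hypertension", ["hypertension", "high blood pressure", "elevated bp", "htn"]),
   ("heart disease", ["cardiac", "cardiovascular", "heart", "coronary"]),
   ("depression", ["depression", "depressive", "mood disorder", "mental health"])]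

-- A's for-loop over the groups: on a matching group, return True if some
-- variation occurs in trial_lower, otherwise keep scanning
def pvLoopA (pl tl : String) : List (String × List String) → Bool
  | [] => false
  | (base, vars) :: rest =>
    if vars.contains pl || pl == base then
      if vars.any (fun v => PySem.Str.isIn v tl) then true
      else pvLoopA pl tl rest
    else pvLoopA pl tl rest

def conditions_match_umls_py (patient_condition : String) (trial_condition : String) (patient_cuis : List String) : Bool :=
  if PySem.Str.isIn (PySem.Str.lower patient_condition) (PySem.Str.lower trial_condition) then true
  else
    let patient_lower := PySem.Str.lower patient_condition
    let trial_lower := PySem.Str.lower trial_condition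
    pvLoopA patient_lower trial_lower pvCondMappings

-- ===== PORT B =====
-- Source B's import-time builder: for each group, insert base and every variation
-- as a key mapping to the group's variation list
def pvIndexB : PySem.Dict String (List String) :=
  pvCondMappings.foldl
    (fun d g => (g.1 :: g.2).foldl (fun d k => PySem.Dict.insert d k g.2) d)
    PySem.Dict.empty

def conditions_match_umls_py_alt (patient_condition : String) (trial_condition : String) (patient_cuis : List String) : Bool :=
  let patient_lower := PySem.Str.lower patient_condition
  let trial_lower := PySem.Str.lower trial_condition
  if PySem.Str.isIn patient_lower trial_lower then true
  else
    match PySem.Dict.get? pvIndexB patient_lower with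
    | none => false
    | some variations => variations.any (fun var => PySem.Str.isIn var trial_lower)

-- ===== PRECONDITION & SPEC =====
def Spec_conditions_match_umls_py (patient_condition : String) (trial_condition : String) (patient_cuis : List String) (out : Bool) : Prop := out = conditions_match_umls_py_alt patient_condition trial_condition patient_cuis
instance (patient_condition : String) (trial_condition : String) (patient_cuis : List String) (out : Bool) : Decidable (Spec_conditions_match_umls_py patient_condition trial_condition patient_cuis out) := by unfold Spec_conditions_match_umls_py; infer_instance

-- ===== CLAIM (what is proved, stated in full; the proofs are below) =====
def Claim_equal_conditions_match_umls_py : Prop := ∀ (patient_condition : String) (trial_condition : String) (patient_cuis : List String), Dom_conditions_match_umls_py patient_condition trial_condition patient_cuis → Spec_conditions_match_umls_py patient_condition trial_condition patient_cuis (conditions_match_umls_py patient_condition trial_condition patient_cuis)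

-- ===== LEMMAS AND PROOFS =====

-- the loop over the groups agrees with the inverted-index lookup, for every
-- patient_lower pl and trial_lower tl: case split on which (unique) key pl is
set_option maxRecDepth 8192 in
theorem pvLoop_eq_index (pl tl : String) :
    pvLoopA pl tl pvCondMappings =
      (match PySem.Dict.get? pvIndexB pl with
       | none => false
       | some variations => variations.any (fun var => PySem.Str.isIn var tl)) := by
  simp only [pvIndexB, pvCondMappings, List.foldl_cons, List.foldl_nil]
  by_cases h0 : pl = "diabetes"
  · subst h0
    simp [pvLoopA, pvCondMappings, PySem.Dict.get?_insert, PySem.Dict.get?_empty]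
  by_cases h1 : pl = "diabetic"
  · subst h1
    simp [pvLoopA, pvCondMappings, PySem.Dict.get?_insert, PySem.Dict.get?_empty]
  by_cases h2 : pl = "hyperglycemia"
  · subst h2
    simp [pvLoopA, pvCondMappings, PySem.Dict.get?_insert, PySem.Dict.get?_empty]
  by_cases h3 : pl = "glucose"
  · subst h3
    simp [pvLoopA, pvCondMappings, PySem.Dict.get?_insert, PySem.Dict.get?_empty]
  by_cases h4 : pl = "type 2 diabetes"
  · subst h4
    simp [pvLoopA, pvCondMappings, PySem.Dict.get?_insert, PySem.Dict.get?_empty]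
  by_cases h5 : pl = "type 2"
  · subst h5
    simp [pvLoopA, pvCondMappings, PySem.Dict.get?_insert, PySem.Dict.get?_empty]
  by_cases h6 : pl = "diabetes mellitus"
  · subst h6
    simp [pvLoopA, pvCondMappings, PySem.Dict.get?_insert, PySem.Dict.get?_empty]
  by_cases h7 : pl = "non-insulin dependent"
  · subst h7
    simp [pvLoopA, pvCondMappings, PySem.Dict.get?_insert, PySem.Dict.get?_empty]
  by_cases h8 : pl = "hypertension"
  · subst h8
    simp [pvLoopA, pvCondMappings, PySem.Dict.get?_insert, PySem.Dict.get?_empty]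
  by_cases h9 : pl = "high blood pressure"
  · subst h9
    simp [pvLoopA, pvCondMappings, PySem.Dict.get?_insert, PySem.Dict.get?_empty]
  by_cases h10 : pl = "elevated bp"
  · subst h10
    simp [pvLoopA, pvCondMappings, PySem.Dict.get?_insert, PySem.Dict.get?_empty]
  by_cases h11 : pl = "htn"
  · subst h11
    simp [pvLoopA, pvCondMappings, PySem.Dict.get?_insert, PySem.Dict.get?_empty]
  by_cases h12 : pl = "heart disease"
  · subst h12
    simp [pvLoopA, pvCondMappings, PySem.Dict.get?_insert, PySem.Dict.get?_empty]
  by_cases h13 : pl = "cardiac"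
  · subst h13
    simp [pvLoopA, pvCondMappings, PySem.Dict.get?_insert, PySem.Dict.get?_empty]
  by_cases h14 : pl = "cardiovascular"
  · subst h14
    simp [pvLoopA, pvCondMappings, PySem.Dict.get?_insert, PySem.Dict.get?_empty]
  by_cases h15 : pl = "heart"
  · subst h15
    simp [pvLoopA, pvCondMappings, PySem.Dict.get?_insert, PySem.Dict.get?_empty]
  by_cases h16 : pl = "coronary"
  · subst h16
    simp [pvLoopA, pvCondMappings, PySem.Dict.get?_insert, PySem.Dict.get?_empty]
  by_cases h17 : pl = "depression"
  · subst h17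
    simp [pvLoopA, pvCondMappings, PySem.Dict.get?_insert, PySem.Dict.get?_empty]
  by_cases h18 : pl = "depressive"
  · subst h18
    simp [pvLoopA, pvCondMappings, PySem.Dict.get?_insert, PySem.Dict.get?_empty]
  by_cases h19 : pl = "mood disorder"
  · subst h19
    simp [pvLoopA, pvCondMappings, PySem.Dict.get?_insert, PySem.Dict.get?_empty]
  by_cases h20 : pl = "mental health"
  · subst h20
    simp [pvLoopA, pvCondMappings, PySem.Dict.get?_insert, PySem.Dict.get?_empty]
  have e0 : (pl == "diabetes") = false := beq_eq_false_iff_ne.mpr h0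
  have e1 : (pl == "diabetic") = false := beq_eq_false_iff_ne.mpr h1
  have e2 : (pl == "hyperglycemia") = false := beq_eq_false_iff_ne.mpr h2
  have e3 : (pl == "glucose") = false := beq_eq_false_iff_ne.mpr h3
  have e4 : (pl == "type 2 diabetes") = false := beq_eq_false_iff_ne.mpr h4
  have e5 : (pl == "type 2") = false := beq_eq_false_iff_ne.mpr h5
  have e6 : (pl == "diabetes mellitus") = false := beq_eq_false_iff_ne.mpr h6
  have e7 : (pl == "non-insulin dependent") = false := beq_eq_false_iff_ne.mpr h7
  have e8 : (pl == "hypertension") = false := beq_eq_false_iff_ne.mpr h8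
  have e9 : (pl == "high blood pressure") = false := beq_eq_false_iff_ne.mpr h9
  have e10 : (pl == "elevated bp") = false := beq_eq_false_iff_ne.mpr h10
  have e11 : (pl == "htn") = false := beq_eq_false_iff_ne.mpr h11
  have e12 : (pl == "heart disease") = false := beq_eq_false_iff_ne.mpr h12
  have e13 : (pl == "cardiac") = false := beq_eq_false_iff_ne.mpr h13
  have e14 : (pl == "cardiovascular") = false := beq_eq_false_iff_ne.mpr h14
  have e15 : (pl == "heart") = false := beq_eq_false_iff_ne.mpr h15
  have e16 : (pl == "coronary") = false := beq_eq_false_iff_ne.mpr h16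
  have e17 : (pl == "depression") = false := beq_eq_false_iff_ne.mpr h17
  have e18 : (pl == "depressive") = false := beq_eq_false_iff_ne.mpr h18
  have e19 : (pl == "mood disorder") = false := beq_eq_false_iff_ne.mpr h19
  have e20 : (pl == "mental health") = false := beq_eq_false_iff_ne.mpr h20
  have hnone : ∀ (d : PySem.Dict String (List String)), pl ∉ d.keys → d.get? pl = none := by
    intro d hd; exact (PySem.Dict.get?_eq_none_iff_not_mem_keys d pl).mpr hd
  rw [hnone _ (by simp only [PySem.Dict.mem_keys_insert, PySem.Dict.keys_empty, List.not_mem_nil, or_false]; simp [h0, h1, h2, h3, h4, h5, h6, h7, h8, h9, h10, h11, h12, h13, h14, h15, h16, h17, h18, h19, h20])]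
  simp only [pvLoopA, List.contains_cons, List.contains_nil, e0, e1, e2, e3, e4, e5, e6, e7, e8, e9, e10, e11, e12, e13, e14, e15, e16, e17, e18, e19, e20, Bool.false_or, Bool.or_self, Bool.false_eq_true, if_false]

-- ===== VERDICT (by name: the statement is the Claim_ definition above) =====
theorem conditions_match_umls_py_spec : Claim_equal_conditions_match_umls_py := by
  intro p t cuis _
  unfold Spec_conditions_match_umls_py conditions_match_umls_py conditions_match_umls_py_alt
  simp only [pvLoop_eq_index]
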